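-- pv_equiv track=rewrite | github.com/jstck/aoc | 2022/05/run.py | chunks
-- ===== SOURCE A (Python) =====
-- def chunks(input, ints=False):
--     chunk = []
--     chunky = []
--     for line in input:
--         if len(line.strip()) == 0:
--             chunky.append(chunk)
--             chunk = []
--         else:
--             if ints:
--                 chunk.append(int(line))
--             else:
--                 chunk.append(line)
--
--     chunky.append(chunk)
--     return chunky
-- ===== SOURCE B (Python) =====
-- def chunks(input, ints=False):
--     # Build the chunk list back-to-front in one reversed pass: a blank line
--     # opens a new chunk, a data line joins the chunk opened last.  Both the
--     # chunk order and each chunk's contents come out reversed, so undo both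
--     # reversals at the end.
--     rev_out = [[]]
--     for line in reversed(list(input)):
--         if len(line.strip()) == 0:
--             rev_out.append([])
--         else:
--             rev_out[-1].append(int(line) if ints else line)
--     return [list(reversed(c)) for c in reversed(rev_out)]
-- ===== Notes on version B (the rewrite author's own statement) =====
-- stated objective: alternative
-- what changed: B builds the chunk list back-to-front in one reversed pass (a blank line opens a new chunk, a data line joins the chunk opened last) and undoes the two reversals at the end, instead of A's forward append/flush loop with a separate current-chunk accumulator.
-- outside the precondition, e.g. on chunks(['1', '', ' 7 '], True): A returns [[1], [7]], B returns [[1], [7]]; on chunks(['x'], True): A raises ValueError, B raises ValueError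
import Mathlib
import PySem

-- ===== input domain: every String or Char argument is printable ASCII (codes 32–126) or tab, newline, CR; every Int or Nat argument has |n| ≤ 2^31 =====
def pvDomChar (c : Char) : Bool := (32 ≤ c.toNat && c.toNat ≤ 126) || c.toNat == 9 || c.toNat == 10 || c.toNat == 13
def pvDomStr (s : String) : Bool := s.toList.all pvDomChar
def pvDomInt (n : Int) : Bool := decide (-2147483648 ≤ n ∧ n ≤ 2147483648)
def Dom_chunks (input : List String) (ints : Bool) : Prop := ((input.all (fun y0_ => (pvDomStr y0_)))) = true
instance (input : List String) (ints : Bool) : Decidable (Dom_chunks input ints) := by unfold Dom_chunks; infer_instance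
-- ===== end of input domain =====

-- B builds the chunk list back-to-front in one reversed pass (undoing the reversals at the end) instead of A's forward append/flush loop (alternative decomposition, same cost).


-- ===== PORT A =====
-- forward loop: blank line flushes the current chunk, data line is appended to it
def chunks (input : List String) (ints : Bool) : List (List String) :=
  let st := input.foldl (fun (s : List (List String) × List String) line =>
    if PySem.Str.len (PySem.Str.strip line) = 0 then (s.1 ++ [s.2], [])
    else if ints then (s.1, s.2 ++ [line])   -- Python appends int(line): a Python int, which List (List String) cannot hold; Pre_chunks admits ints = true only when every line is blank, so this branch is never reached on admitted inputs
    else (s.1, s.2 ++ [line])) ([], [])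
  st.1 ++ [st.2]

-- ===== PORT B =====
-- reversed pass: blank line opens a new chunk, data line joins the chunk opened last; chunk order and contents come out reversed, both undone at the end
def chunks_alt (input : List String) (ints : Bool) : List (List String) :=
  let rev_out := input.reverse.foldl (fun (ro : List (List String)) line =>
    if PySem.Str.len (PySem.Str.strip line) = 0 then ro ++ [[]]
    else ro.dropLast ++ [((ro.getLast?).getD []) ++ [if ints then line else line]]   -- Python appends int(line) when ints; unreachable on admitted inputs (see port A)
    ) [[]]
  rev_out.reverse.map (fun c => c.reverse)

-- ===== PRECONDITION & SPEC =====
-- Pre_ excludes only ints = true together with a non-blank line: there A either RAISES ValueError (non-integer line) or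
-- returns lists of Python ints — a value OUTSIDE the declared List (List String) return type, which the typed ports cannot
-- express; B's Python reproduces A exactly on those inputs too (same ints, same ValueError), see the cites.
def Pre_chunks (input : List String) (ints : Bool) : Prop :=
  ints = false ∨ ∀ l ∈ input, PySem.Chars.strip l.toList = []
instance (input : List String) (ints : Bool) : Decidable (Pre_chunks input ints) := by unfold Pre_chunks; infer_instance
def pvWitness_chunks : List String × Bool := (["move 1", "", "  ", "move 2"], false)
def Spec_chunks (input : List String) (ints : Bool) (out : List (List String)) : Prop := out = chunks_alt input ints
instance (input : List String) (ints : Bool) (out : List (List String)) : Decidable (Spec_chunks input ints out) := by unfold Spec_chunks; infer_instance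

-- ===== CLAIM (what is proved, stated in full; the proofs are below) =====
def Claim_equal_chunks : Prop := ∀ (input : List String) (ints : Bool), Dom_chunks input ints → Pre_chunks input ints → Spec_chunks input ints (chunks input ints)

-- ===== LEMMAS AND PROOFS =====

-- A's loop body, named for the proofs
def stepA (ints : Bool) (s : List (List String) × List String) (line : String) :
    List (List String) × List String :=
  if PySem.Str.len (PySem.Str.strip line) = 0 then (s.1 ++ [s.2], [])
  else if ints then (s.1, s.2 ++ [line])
  else (s.1, s.2 ++ [line])

-- B's loop body, named for the proofs
def stepB' (ints : Bool) (ro : List (List String)) (line : String) : List (List String) :=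
  if PySem.Str.len (PySem.Str.strip line) = 0 then ro ++ [[]]
  else ro.dropLast ++ [((ro.getLast?).getD []) ++ [if ints then line else line]]

-- the chunk split, built front-to-back by structural recursion: the common reference point
def stepB (ints : Bool) (line : String) (out : List (List String)) : List (List String) :=
  if PySem.Str.len (PySem.Str.strip line) = 0 then [] :: out
  else match out with
    | c :: cs => ((if ints then line else line) :: c) :: cs
    | [] => [[line]]

def chunksB (ints : Bool) (input : List String) : List (List String) :=
  input.foldr (stepB ints) [[]]

-- attach a pending chunk to the front chunk of a chunk list
def consHead (chunk : List String) : List (List String) → List (List String)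
  | c :: cs => (chunk ++ c) :: cs
  | [] => [chunk]

theorem chunksB_ne_nil (ints : Bool) (input : List String) : chunksB ints input ≠ [] := by
  induction input with
  | nil => simp [chunksB]
  | cons l ls ih =>
    simp only [chunksB, List.foldr_cons] at *
    cases h' : ls.foldr (stepB ints) [[]] with
    | nil => exact absurd h' ih
    | cons c cs =>
      simp only [stepB]
      split_ifs <;> simp

-- B's reversed loop builds exactly the reference split, chunk order and contents reversed
theorem foldB'_eq (ints : Bool) (ls : List String) :
    ls.foldr (fun line ro => stepB' ints ro line) [[]]
      = (chunksB ints ls).reverse.map (fun c => c.reverse) := by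
  induction ls with
  | nil => simp [chunksB]
  | cons l ls ih =>
    simp only [List.foldr_cons, ih, chunksB]
    by_cases h : PySem.Chars.strip l.toList = []
    · simp [stepB', stepB, h]
    · cases h' : ls.foldr (stepB ints) [[]] with
      | nil => exact absurd h' (chunksB_ne_nil ints ls)
      | cons c cs => simp [stepB', stepB, h]

theorem chunks_alt_eq_chunksB (input : List String) (ints : Bool) :
    chunks_alt input ints = chunksB ints input := by
  show (input.reverse.foldl (fun ro line => stepB' ints ro line) [[]]).reverse.map (fun c => c.reverse)
      = chunksB ints input
  rw [List.foldl_reverse, foldB'_eq]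
  simp [List.map_map]

theorem chunks_eq_foldl_stepA (input : List String) (ints : Bool) :
    chunks input ints =
      (input.foldl (stepA ints) ([], [])).1 ++ [(input.foldl (stepA ints) ([], [])).2] := by
  rfl

-- the forward loop from any accumulator state equals the back-to-front result with the pending chunk attached
theorem chunksA_loop (ints : Bool) (ls : List String) :
    ∀ acc chunk,
      (ls.foldl (stepA ints) (acc, chunk)).1 ++ [(ls.foldl (stepA ints) (acc, chunk)).2]
        = acc ++ consHead chunk (chunksB ints ls) := by
  induction ls with
  | nil => intro acc chunk; simp [chunksB, consHead]
  | cons l ls ih =>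
    intro acc chunk
    simp only [List.foldl_cons, chunksB, List.foldr_cons]
    by_cases h : PySem.Chars.strip l.toList = []
    · rw [show stepA ints (acc, chunk) l = (acc ++ [chunk], []) from by simp [stepA, h]]
      rw [ih]
      cases h' : ls.foldr (stepB ints) [[]] with
      | nil => exact absurd h' (chunksB_ne_nil ints ls)
      | cons c cs =>
        simp only [chunksB] at *
        simp [stepB, h, h', consHead]
    · rw [show stepA ints (acc, chunk) l = (acc, chunk ++ [l]) from by simp [stepA, h]]
      rw [ih]
      cases h' : ls.foldr (stepB ints) [[]] with
      | nil => exact absurd h' (chunksB_ne_nil ints ls)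
      | cons c cs =>
        simp only [chunksB, h'] at *
        simp [stepB, h, consHead]

-- ===== VERDICT (by name: the statement is the Claim_ definition above) =====
theorem chunks_spec : Claim_equal_chunks := by
  intro input ints _ _
  show chunks input ints = chunks_alt input ints
  rw [chunks_eq_foldl_stepA, chunks_alt_eq_chunksB, chunksA_loop ints input [] []]
  cases h : chunksB ints input with
  | nil => exact absurd h (chunksB_ne_nil ints input)
  | cons c cs => simp [consHead]
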